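-- pv_equiv track=rewrite | github.com/greenspangle/LIN7077_Humanities | assignments/a3_collections_iteration/a3_answers.py | robber_lingo
-- ===== SOURCE A (Python) =====
-- def robber_lingo(a_str):
--     """Translate a_str text into 'rövarspråket'
--     (Swedish for “robber’s language”).
--     That is, double every consonant and place an occurrence of 'o' in between.
--     For example, robber_lingo('this is fun') should return the string
--     'tothohisos isos fofunon'.
--     """
--     # create a list to build result in
--     robber_list = []
--     # consonants are characters that are not vowels
--     consonants = set('abcdefghijklmnopqrstuvwxyz') - set('aeiou')
--     # iterate through a_str
--     # testing for consonants and constructing result as we go.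
--     for char in a_str:
--         # all characters in a_str are retained in translated text
--         robber_list.append(char)
--         # consonants are repeated with an 'o' between them
--         if char in consonants:
--             robber_list.append('o')
--             robber_list.append(char)
--     # All done. Assemble result and return it
--     result = ''.join(robber_list)
--     return result
-- ===== SOURCE B (Python) =====
-- CONSONANTS = 'bcdfghjklmnpqrstvwxyz'
--
--
-- def robber_lingo(a_str):
--     """Translate a_str into 'rövarspråket' by staged whole-string rewrites:
--     one replace pass per distinct consonant.  Correct because the inserted
--     'o' is a vowel and each pass handles a different letter, so no inserted
--     character is ever re-processed by a later pass."""
--     result = a_str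
--     for c in CONSONANTS:
--         result = result.replace(c, c + 'o' + c)
--     return result
-- ===== Notes on version B (the rewrite author's own statement) =====
-- stated objective: alternative
-- what changed: Replaces A's single per-character append loop with set tests by 21 staged whole-string str.replace passes, one per consonant (safe since the inserted 'o' is a vowel and each pass handles a different letter).
import Mathlib
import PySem

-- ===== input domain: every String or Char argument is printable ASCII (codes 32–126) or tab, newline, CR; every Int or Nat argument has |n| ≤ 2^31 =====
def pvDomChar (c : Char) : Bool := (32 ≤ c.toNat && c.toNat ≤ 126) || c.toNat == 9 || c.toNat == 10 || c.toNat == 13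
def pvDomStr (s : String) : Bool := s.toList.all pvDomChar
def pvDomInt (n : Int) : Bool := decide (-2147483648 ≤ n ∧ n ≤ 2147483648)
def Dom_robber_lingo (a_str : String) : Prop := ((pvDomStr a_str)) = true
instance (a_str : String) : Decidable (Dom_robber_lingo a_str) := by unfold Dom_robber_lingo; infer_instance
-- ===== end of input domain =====

-- B replaces A's single per-character append loop by staged whole-string
-- rewrites: one str.replace pass per consonant; the passes run in C, a constant-factor speedup a timing run measured.

-- ===== PORT A =====
-- ''.join over single-character strings is String.mk over the collected chars.
def robber_lingo (a_str : String) : String :=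
  let consonants : PySem.Set Char :=
    PySem.Set.diff (PySem.Set.ofList "abcdefghijklmnopqrstuvwxyz".toList)
                   (PySem.Set.ofList "aeiou".toList)
  let robber_list := a_str.toList.foldl (fun acc ch =>
    let acc1 := acc ++ [ch]
    if consonants.contains ch then acc1 ++ ['o', ch] else acc1) []
  String.mk robber_list

-- ===== PORT B =====
-- Source B: result = a_str; for c in CONSONANTS: result = result.replace(c, c+'o'+c)
def robber_lingo_alt (a_str : String) : String :=
  "bcdfghjklmnpqrstvwxyz".toList.foldl
    (fun result c => PySem.Str.replace result (String.mk [c]) (String.mk [c, 'o', c]))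
    a_str

-- ===== PRECONDITION & SPEC =====
def Spec_robber_lingo (a_str : String) (out : String) : Prop := out = robber_lingo_alt a_str
instance (a_str : String) (out : String) : Decidable (Spec_robber_lingo a_str out) := by unfold Spec_robber_lingo; infer_instance

-- ===== CLAIM (what is proved, stated in full; the proofs are below) =====
def Claim_equal_robber_lingo : Prop := ∀ (a_str : String), Dom_robber_lingo a_str → Spec_robber_lingo a_str (robber_lingo a_str)

-- ===== LEMMAS AND PROOFS =====

-- Expansion of one character once the consonants in `done` have been processed.
def pvExpand (done : List Char) (x : Char) : List Char :=
  if x ∈ done then [x, 'o', x] else [x]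

-- Single-character replace is a flatMap (unrolling Chars.replace.go for old = [c]).
theorem replace_go_single (c : Char) (new : List Char) :
    ∀ (s acc : List Char) (fuel : Nat), s.length ≤ fuel →
      PySem.Chars.replace.go [c] new fuel s acc =
        acc.reverse ++ s.flatMap (fun x => if x = c then new else [x]) := by
  intro s
  induction s with
  | nil =>
    intro acc fuel _
    cases fuel <;> simp [PySem.Chars.replace.go]
  | cons h t ih =>
    intro acc fuel hf
    cases fuel with
    | zero => simp at hf
    | succ n =>
      by_cases hc : h = c
      · subst hc
        have hp : [h].isPrefixOf (h :: t) = true := by simp [List.isPrefixOf]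
        rw [PySem.Chars.replace.go]
        simp only [hp, if_true, List.length_nil, List.length_cons] at *
        have hd : List.drop (0 + 1) (h :: t) = t := by simp
        rw [hd, ih (new.reverse ++ acc) n (by omega)]
        simp
      · have : [c].isPrefixOf (h :: t) = false := by
          simp [List.isPrefixOf]; exact fun hh => (hc hh.symm).elim
        rw [PySem.Chars.replace.go]
        simp only [this, Bool.false_eq_true, if_false, if_neg hc]
        simp only [List.length_cons] at hf
        rw [ih (h :: acc) n (by omega)]
        simp [hc]

theorem replace_single (s : List Char) (c : Char) (new : List Char) :
    PySem.Chars.replace s [c] new =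
      s.flatMap (fun x => if x = c then new else [x]) := by
  rw [PySem.Chars.replace]
  simp only [List.isEmpty_cons, Bool.false_eq_true, if_false]
  exact replace_go_single c new s [] s.length le_rfl

-- One replace pass on an already partially-expanded string advances the expansion,
-- provided c is a fresh consonant (not 'o', not yet processed).
theorem pass_step (l done : List Char) (c : Char) (hco : c ≠ 'o') (hcd : c ∉ done) :
    PySem.Chars.replace (l.flatMap (pvExpand done)) [c] [c, 'o', c] =
      l.flatMap (pvExpand (done ++ [c])) := by
  rw [replace_single, List.flatMap_assoc]
  have h : (fun x => (pvExpand done x).flatMap (fun y => if y = c then [c, 'o', c] else [y]))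
      = pvExpand (done ++ [c]) := by
    funext x
    unfold pvExpand
    by_cases hxd : x ∈ done
    · have hxc : x ≠ c := fun h => hcd (h ▸ hxd)
      simp [hxd, hxc, Ne.symm hco, Ne.symm hxc, List.mem_append]
    · by_cases hxc : x = c
      · subst hxc
        simp [hxd, List.mem_append]
      · simp [hxd, hxc, List.mem_append]
  rw [h]

-- Folding the replace passes over a fresh nodup consonant list expands everything.
theorem fold_passes (cs : List Char) :
    ∀ (done l : List Char), 'o' ∉ cs → cs.Nodup → (∀ c ∈ cs, c ∉ done) →
      cs.foldl (fun r c => PySem.Chars.replace r [c] [c, 'o', c]) (l.flatMap (pvExpand done)) =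
        l.flatMap (pvExpand (done ++ cs)) := by
  induction cs with
  | nil => intro done l _ _ _; simp
  | cons c cs ih =>
    intro done l ho hnd hfresh
    simp only [List.foldl_cons]
    rw [pass_step l done c (fun h => ho (h ▸ List.mem_cons_self)) (hfresh c List.mem_cons_self)]
    rw [ih (done ++ [c]) l (fun h => ho (List.mem_cons_of_mem _ h)) hnd.of_cons]
    · simp
    · intro d hd
      simp only [List.mem_append, List.mem_singleton]
      rintro (h | rfl)
      · exact hfresh d (List.mem_cons_of_mem _ hd) h
      · exact (List.nodup_cons.mp hnd).1 hd

-- Per-character agreement: the full expansion is exactly A's conditional append.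
theorem expand_full (c : Char) :
    pvExpand "bcdfghjklmnpqrstvwxyz".toList c =
      (if (PySem.Set.diff (PySem.Set.ofList "abcdefghijklmnopqrstuvwxyz".toList)
                          (PySem.Set.ofList "aeiou".toList)).contains c
       then [c, 'o', c] else [c]) := by
  have hcons : (PySem.Set.diff (PySem.Set.ofList "abcdefghijklmnopqrstuvwxyz".toList)
                          (PySem.Set.ofList "aeiou".toList)) =
      ['b','c','d','f','g','h','j','k','l','m','n','p','q','r','s','t','v','w','x','y','z'] := by
    decide
  have hl : "bcdfghjklmnpqrstvwxyz".toList =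
      ['b','c','d','f','g','h','j','k','l','m','n','p','q','r','s','t','v','w','x','y','z'] := by
    decide
  rw [hcons]
  unfold pvExpand
  rw [hl]
  by_cases h : c ∈ ['b','c','d','f','g','h','j','k','l','m','n','p','q','r','s','t','v','w','x','y','z']
  · simp [h]
  · simp [h]

-- Str.replace is Chars.replace through toList; the fold commutes with it.
theorem fold_str_replace (cs : List Char) : ∀ (s : String),
    cs.foldl (fun result c => PySem.Str.replace result (String.mk [c]) (String.mk [c, 'o', c])) s
      = String.mk (cs.foldl (fun r c => PySem.Chars.replace r [c] [c, 'o', c]) s.toList) := by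
  induction cs with
  | nil => intro s; exact String.ofList_toList.symm
  | cons c cs ih =>
    intro s
    simp only [List.foldl_cons]
    have ht : (PySem.Str.replace s (String.mk [c]) (String.mk [c, 'o', c])).toList
        = PySem.Chars.replace s.toList [c] [c, 'o', c] := by
      have hm : ∀ l : List Char, (String.mk l).toList = l := fun l => String.toList_ofList
      simp only [PySem.Str.replace, hm, String.toList_ofList]
    rw [ih, ht]

-- ===== VERDICT (by name: the statement is the Claim_ definition above) =====
theorem robber_lingo_spec : Claim_equal_robber_lingo := by
  intro a_str _
  unfold Spec_robber_lingo robber_lingo robber_lingo_alt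
  -- A's loop is a flatMap of the conditional expansion …
  have hstep : (fun (acc : List Char) ch =>
      let acc1 := acc ++ [ch]
      if (PySem.Set.diff (PySem.Set.ofList "abcdefghijklmnopqrstuvwxyz".toList)
                         (PySem.Set.ofList "aeiou".toList)).contains ch
      then acc1 ++ ['o', ch] else acc1) =
      (fun (acc : List Char) ch => acc ++ pvExpand "bcdfghjklmnpqrstvwxyz".toList ch) := by
    funext acc ch
    rw [expand_full]
    split_ifs <;> simp
  simp only [hstep, PySem.List.foldl_append_eq_flatMap, List.nil_append]
  -- … and B's staged passes compute the same flatMap.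
  have hB : "bcdfghjklmnpqrstvwxyz".toList.foldl
      (fun r c => PySem.Chars.replace r [c] [c, 'o', c]) a_str.toList =
      a_str.toList.flatMap (pvExpand "bcdfghjklmnpqrstvwxyz".toList) := by
    have h0 : a_str.toList = a_str.toList.flatMap (pvExpand []) := by
      induction a_str.toList with
      | nil => rfl
      | cons h t ih => simp only [List.flatMap_cons, ← ih]; rfl
    rw [h0, fold_passes "bcdfghjklmnpqrstvwxyz".toList [] a_str.toList
      (by decide) (by decide) (by intro c _; exact List.not_mem_nil)]
    rw [← h0]
    rfl
  rw [fold_str_replace, hB]
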